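-- pv_equiv track=rewrite | github.com/JoaoAndrade18/AnaliseDatasetChess | src/Testes-dataset-final-final/analiseFinal_3FreqTrue3Vezes.py | get_player_final
-- ===== SOURCE A (Python) =====
-- def get_player_final(data):
--     freq = 0
--     last = 0
--     nvezes = 0
--     for i in data:
--         last = freq
--         if i == '1':
--             freq += 1
--
--         elif last >=3 and i == '0':
--             nvezes += 1
--             freq = 0
--
--         else:
--             freq = 0
--
--     if nvezes >= 3:
--         return True
--     else:
--         return False
-- ===== SOURCE B (Python) =====
-- def get_player_final(data):
--     # run-length encode, then count '1'-runs of length >= 3 immediately followed by a '0'-run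
--     runs = []
--     i = 0
--     n = len(data)
--     while i < n:
--         j = i + 1
--         while j < n and data[j] == data[i]:
--             j += 1
--         runs.append((data[i], j - i))
--         i = j
--     count = 0
--     for (k1, n1), (k2, _) in zip(runs, runs[1:]):
--         if k1 == '1' and n1 >= 3 and k2 == '0':
--             count += 1
--     return count >= 3
-- ===== Notes on version B (the rewrite author's own statement) =====
-- stated objective: alternative
-- what changed: A's single-pass streak/counter state machine is replaced by a run-length encoding of the input followed by a pairwise scan over adjacent runs counting '1'-runs of length >= 3 immediately followed by a '0'-run.
import Mathlib
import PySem

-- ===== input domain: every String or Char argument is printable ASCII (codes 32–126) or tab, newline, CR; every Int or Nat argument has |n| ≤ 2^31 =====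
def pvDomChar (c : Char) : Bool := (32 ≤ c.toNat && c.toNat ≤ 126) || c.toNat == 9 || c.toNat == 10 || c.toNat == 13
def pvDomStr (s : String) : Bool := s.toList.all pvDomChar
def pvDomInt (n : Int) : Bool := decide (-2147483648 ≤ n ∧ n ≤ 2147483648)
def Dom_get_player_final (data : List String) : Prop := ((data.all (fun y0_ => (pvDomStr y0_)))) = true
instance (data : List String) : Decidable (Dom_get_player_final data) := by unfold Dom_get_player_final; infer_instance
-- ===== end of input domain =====

-- B replaces A's streak-counter state machine by a run-length encoding followed by a
-- pairwise scan over adjacent runs (alternative decomposition, same cost).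

-- ===== PORT A =====
-- A's loop body; state = (freq, last, nvezes), exactly A's loop variables
def pvStepA (st : Int × Int × Int) (i : String) : Int × Int × Int :=
  let freq := st.1
  let nvezes := st.2.2
  let last := freq
  if i = "1" then (freq + 1, last, nvezes)
  else if last ≥ 3 ∧ i = "0" then (0, last, nvezes + 1)
  else (0, last, nvezes)

def get_player_final (data : List String) : Bool :=
  let s := data.foldl pvStepA (0, 0, 0)
  if s.2.2 ≥ 3 then true else false

-- ===== PORT B =====
-- the outer while loop of Source B: peel off one maximal run of equal elements at a time
def pvRuns : List String → List (String × Nat)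
  | [] => []
  | x :: xs =>
    (x, 1 + (xs.takeWhile (fun y => y = x)).length) :: pvRuns (xs.dropWhile (fun y => y = x))
termination_by l => l.length
decreasing_by
  simp only [List.length_cons]
  exact Nat.lt_succ_of_le (List.length_dropWhile_le _ _)

-- the zip(runs, runs[1:]) counting loop of Source B
def pvCountRuns : List (String × Nat) → Int
  | (k1, n1) :: (k2, n2) :: rest =>
    (if k1 = "1" ∧ n1 ≥ 3 ∧ k2 = "0" then 1 else 0) + pvCountRuns ((k2, n2) :: rest)
  | _ => 0

def get_player_final_alt (data : List String) : Bool :=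
  decide (pvCountRuns (pvRuns data) ≥ 3)

-- ===== PRECONDITION & SPEC =====
def Spec_get_player_final (data : List String) (out : Bool) : Prop := out = get_player_final_alt data
instance (data : List String) (out : Bool) : Decidable (Spec_get_player_final data out) := by unfold Spec_get_player_final; infer_instance

-- ===== CLAIM (what is proved, stated in full; the proofs are below) =====
def Claim_equal_get_player_final : Prop := ∀ (data : List String), Dom_get_player_final data → Spec_get_player_final data (get_player_final data)

-- ===== LEMMAS AND PROOFS =====

theorem pvRuns_nil : pvRuns [] = [] := by rw [pvRuns]

theorem pvRuns_cons (x : String) (xs : List String) :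
    pvRuns (x :: xs) = (x, 1 + (xs.takeWhile (fun y => y = x)).length)
      :: pvRuns (xs.dropWhile (fun y => y = x)) := by rw [pvRuns]

-- the count A's loop produces, as a function of the remaining input and the incoming streak
def pvG : List String → Int → Int
  | [], _ => 0
  | x :: xs, f =>
    if x = "1" then pvG xs (f + 1)
    else if f ≥ 3 ∧ x = "0" then 1 + pvG xs 0
    else pvG xs 0

theorem pvFold_eq_pvG (data : List String) : ∀ (f l nv : Int),
    (data.foldl pvStepA (f, l, nv)).2.2 = nv + pvG data f := by
  induction data with
  | nil => intro f l nv; simp [pvG]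
  | cons x xs ih =>
    intro f l nv
    simp only [List.foldl_cons, pvG, pvStepA]
    split_ifs with h1 h2
    · rw [ih]
    · rw [ih]; ring
    · rw [ih]

theorem pvG_ones (l : List String) (hl : ∀ y ∈ l, y = "1") :
    ∀ (rest : List String) (f : Int), pvG (l ++ rest) f = pvG rest (f + l.length) := by
  induction l with
  | nil => intro rest f; simp
  | cons x xs ih =>
    intro rest f
    have hx : x = "1" := hl x (by simp)
    have hxs : ∀ y ∈ xs, y = "1" := fun y hy => hl y (by simp [hy])
    simp only [List.cons_append, pvG, hx, ih hxs, List.length_cons]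
    push_cast
    ring_nf

theorem pvG_nonones (l : List String) (hl : ∀ y ∈ l, ¬ y = "1") :
    ∀ (rest : List String), pvG (l ++ rest) 0 = pvG rest 0 := by
  induction l with
  | nil => intro rest; simp
  | cons x xs ih =>
    intro rest
    have hx : ¬ x = "1" := hl x (by simp)
    have hxs : ∀ y ∈ xs, ¬ y = "1" := fun y hy => hl y (by simp [hy])
    have h0 : ¬ ((0 : Int) ≥ 3 ∧ x = "0") := by intro h; omega
    simp only [List.cons_append, pvG, if_neg hx, if_neg h0, ih hxs]

theorem pvG_eq_countRuns (data : List String) : pvG data 0 = pvCountRuns (pvRuns data) := by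
  induction data using pvRuns.induct with
  | case1 => simp [pvRuns_nil, pvG, pvCountRuns]
  | case2 x xs ih =>
    have hsplit : x :: xs = (x :: xs.takeWhile (fun y => y = x)) ++ xs.dropWhile (fun y => y = x) := by
      simp [List.takeWhile_append_dropWhile]
    by_cases hx : x = "1"
    · subst hx
      have hones : ∀ y ∈ ("1" :: xs.takeWhile (fun y => y = "1")), y = "1" := by
        intro y hy
        rcases List.mem_cons.mp hy with h | h
        · exact h
        · have := List.mem_takeWhile_imp h; simpa using this
      conv_lhs => rw [hsplit]
      rw [pvG_ones _ hones]
      rw [pvRuns_cons]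
      rcases hrest : xs.dropWhile (fun y => decide (y = "1")) with _ | ⟨y, ys⟩
      · simp only [pvRuns_nil, pvCountRuns, pvG]
      · have hy : ¬ y = "1" := by
          have := List.head?_dropWhile_not (fun y => decide (y = "1")) xs
          rw [hrest] at this
          simpa using this
        have hf : (0 + ↑(("1" :: xs.takeWhile (fun y => y = "1")).length) : Int)
            = 1 + ↑((xs.takeWhile (fun y => y = "1")).length) := by
          simp only [List.length_cons]; push_cast; ring
        rw [hrest] at ih
        rw [hf]
        rw [pvRuns_cons]
        rw [pvCountRuns]
        have hG0 : pvG (y :: ys) 0 = pvG ys 0 := by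
          have h0 : ¬ ((0 : Int) ≥ 3 ∧ y = "0") := by intro h; omega
          simp [pvG, if_neg hy]
        have hiff : ((1 : Int) + ↑((xs.takeWhile (fun y => y = "1")).length) ≥ 3 ∧ y = "0")
            ↔ ("1" = "1" ∧ 1 + (xs.takeWhile (fun y => y = "1")).length ≥ 3 ∧ y = "0") := by
          constructor
          · rintro ⟨hn, hy0⟩; exact ⟨rfl, by omega, hy0⟩
          · rintro ⟨-, hn, hy0⟩; exact ⟨by omega, hy0⟩
        rw [pvG]
        rw [if_neg hy]
        simp only [hiff]
        rw [← pvRuns_cons, ← ih, hG0]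
        split_ifs <;> ring_nf
    · have hnon : ∀ y ∈ (x :: xs.takeWhile (fun y => y = x)), ¬ y = "1" := by
        intro y hy
        rcases List.mem_cons.mp hy with h | h
        · exact h ▸ hx
        · have := List.mem_takeWhile_imp h
          simp only [decide_eq_true_eq] at this
          exact this ▸ hx
      conv_lhs => rw [hsplit]
      rw [pvG_nonones _ hnon, ih, pvRuns_cons]
      rcases hrest : pvRuns (xs.dropWhile (fun y => decide (y = x))) with _ | ⟨⟨k2, n2⟩, tail⟩
      · simp [pvCountRuns]
      · rw [pvCountRuns, if_neg (by rintro ⟨h, -⟩; exact hx h)]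
        simp

-- ===== VERDICT (by name: the statement is the Claim_ definition above) =====
theorem get_player_final_spec : Claim_equal_get_player_final := by
  intro data _
  unfold Spec_get_player_final get_player_final get_player_final_alt
  simp only [pvFold_eq_pvG, pvG_eq_countRuns]
  simp
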